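-- pv_equiv track=rewrite | github.com/bingquan/ESP2110-inverted-pendulum-lab | instructor.py | _split_source
-- ===== SOURCE A (Python) =====
-- from typing import List, Dict, Any, Optional
--
-- def _split_source(content: str) -> List[str]:
--     """Split content into lines for notebook format."""
--     lines = content.split('\n')
--     result = []
--     for i, line in enumerate(lines):
--         if i < len(lines) - 1:
--             result.append(line + '\n')
--         else:
--             result.append(line)
--     return result
-- ===== SOURCE B (Python) =====
-- from typing import List
--
-- def _split_source(content: str) -> List[str]:
--     """One forward pass over the characters: accumulate a piece, emit it (newline included) at each '\n'."""
--     result = []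
--     cur = []
--     for ch in content:
--         cur.append(ch)
--         if ch == '\n':
--             result.append(''.join(cur))
--             cur = []
--     result.append(''.join(cur))
--     return result
-- ===== Notes on version B (the rewrite author's own statement) =====
-- stated objective: alternative
-- what changed: Replaces splitting on newlines followed by an enumerate loop that re-appends the separator with a single forward character scan that accumulates a piece and emits it, newline attached, the moment a newline is seen; no intermediate line list or index-vs-length test.
import Mathlib
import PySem

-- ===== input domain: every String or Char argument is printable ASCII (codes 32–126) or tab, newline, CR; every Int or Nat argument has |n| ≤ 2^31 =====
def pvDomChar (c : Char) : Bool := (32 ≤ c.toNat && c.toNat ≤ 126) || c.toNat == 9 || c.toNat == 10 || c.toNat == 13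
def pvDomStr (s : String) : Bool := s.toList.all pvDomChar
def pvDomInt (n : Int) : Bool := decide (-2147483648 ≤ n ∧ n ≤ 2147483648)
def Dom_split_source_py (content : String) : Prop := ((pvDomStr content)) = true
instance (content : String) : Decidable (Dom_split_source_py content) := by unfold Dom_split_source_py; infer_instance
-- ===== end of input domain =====

-- B replaces split-then-reappend-the-separator with a single character scan that emits each
-- piece, newline attached, as it is completed (objective: alternative decomposition, same cost).

-- ===== PORT A =====
def split_source_py (content : String) : List String :=
  let lines := PySem.Chars.splitOn content.toList "\n".toList
  let result : List String := []
  let result := (PySem.List.enumerate lines).foldl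
    (fun result (p : Int × List Char) =>
      if p.1 < (lines.length : Int) - 1 then result ++ [String.ofList (p.2 ++ ['\n'])]
      else result ++ [String.ofList p.2]) result
  result

-- ===== PORT B =====
def split_source_py_alt (content : String) : List String :=
  let st := content.toList.foldl
    (fun (st : List String × List Char) ch =>
      let cur := st.2 ++ [ch]
      if ch = '\n' then (st.1 ++ [String.ofList cur], []) else (st.1, cur))
    ([], [])
  st.1 ++ [String.ofList st.2]

-- ===== PRECONDITION & SPEC =====
def Spec_split_source_py (content : String) (out : List String) : Prop := out = split_source_py_alt content
instance (content : String) (out : List String) : Decidable (Spec_split_source_py content out) := by unfold Spec_split_source_py; infer_instance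

-- ===== CLAIM (what is proved, stated in full; the proofs are below) =====
def Claim_equal_split_source_py : Prop := ∀ (content : String), Dom_split_source_py content → Spec_split_source_py content (split_source_py content)

-- ===== LEMMAS AND PROOFS =====

/-- Reference splitter: pieces of `l` cut at '\n', the accumulator `cur` held reversed
(the shape of `PySem.Chars.splitOn.go`'s accumulator). -/
def rsplit (cur : List Char) : List Char → List (List Char)
  | [] => [cur.reverse]
  | c :: rest => if c = '\n' then cur.reverse :: rsplit [] rest else rsplit (c :: cur) rest

/-- Append '\n' to every piece except the last and pack into strings. -/
def withNL : List (List Char) → List String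
  | [] => []
  | [l] => [String.ofList l]
  | l :: ls => String.ofList (l ++ ['\n']) :: withNL ls

theorem rsplit_ne_nil (cur : List Char) (l : List Char) : rsplit cur l ≠ [] := by
  induction l generalizing cur with
  | nil => simp [rsplit]
  | cons c rest ih => simp only [rsplit]; split_ifs <;> simp [ih]

theorem withNL_cons (l : List Char) (ls : List (List Char)) (h : ls ≠ []) :
    withNL (l :: ls) = String.ofList (l ++ ['\n']) :: withNL ls := by
  cases ls with
  | nil => exact absurd rfl h
  | cons a as => rfl

theorem splitOn_go_eq (fuel : Nat) (l cur : List Char) (acc : List (List Char))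
    (h : l.length < fuel) :
    PySem.Chars.splitOn.go ['\n'] fuel l cur acc = acc.reverse ++ rsplit cur l := by
  induction fuel generalizing l cur acc with
  | zero => omega
  | succ n ih =>
    cases l with
    | nil => simp [PySem.Chars.splitOn.go, rsplit]
    | cons c rest =>
      have hrest : rest.length < n := by simp at h; omega
      simp only [PySem.Chars.splitOn.go, List.isPrefixOf, rsplit]
      by_cases hc : c = '\n'
      · subst hc
        simp only [beq_self_eq_true, Bool.true_and, if_pos, List.length_cons, List.length_nil,
          List.drop_succ_cons, List.drop_zero]
        rw [ih rest [] (cur.reverse :: acc) hrest]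
        simp
      · have hb : ('\n' == c) = false := beq_eq_false_iff_ne.mpr (fun he => hc he.symm)
        rw [if_neg (by simp [hb]), if_neg hc, ih rest (c :: cur) acc hrest]

theorem splitOn_eq_rsplit (s : List Char) :
    PySem.Chars.splitOn s ['\n'] = rsplit [] s := by
  simpa using splitOn_go_eq (s.length + 1) s [] [] (Nat.lt_succ_self _)

/-- A's enumerate-fold appends '\n' to exactly the non-last pieces. -/
theorem foldA_eq_withNL (ls : List (List Char)) (s N : Int) (acc : List String)
    (hN : s + ls.length = N) :
    List.foldl
      (fun result (p : Int × List Char) =>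
        if p.1 < N - 1 then result ++ [String.ofList (p.2 ++ ['\n'])]
        else result ++ [String.ofList p.2]) acc (PySem.List.enumerate ls s)
      = acc ++ withNL ls := by
  induction ls generalizing s acc with
  | nil => simp [PySem.List.enumerate, withNL]
  | cons l rest ih =>
    rw [PySem.List.enumerate_cons]
    simp only [List.length_cons] at hN
    push_cast at hN
    cases rest with
    | nil =>
      have hs : ¬ s < N - 1 := by simp at hN; omega
      simp [hs, withNL, PySem.List.enumerate]
    | cons r rs =>
      have h1 : s < N - 1 := by
        simp only [List.length_cons] at hN; push_cast at hN; omega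
      simp only [List.foldl_cons, if_pos h1]
      rw [ih (s + 1) (_ ++ [String.ofList (l ++ ['\n'])])
          (by simp only [List.length_cons] at hN ⊢; push_cast at hN ⊢; omega),
        withNL_cons l (r :: rs) (by simp)]
      simp

/-- B's scan produces the pieces of `rsplit`, newline attached to each non-last one. -/
theorem foldB_eq_withNL (cs : List Char) (res : List String) (cur : List Char) :
    (let st := cs.foldl
      (fun (st : List String × List Char) ch =>
        let cur := st.2 ++ [ch]
        if ch = '\n' then (st.1 ++ [String.ofList cur], []) else (st.1, cur))
      (res, cur)
     st.1 ++ [String.ofList st.2])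
      = res ++ withNL (rsplit cur.reverse cs) := by
  induction cs generalizing res cur with
  | nil => simp [rsplit, withNL]
  | cons c rest ih =>
    simp only [List.foldl_cons]
    by_cases hc : c = '\n'
    · subst hc
      rw [if_pos rfl]
      have hr : rsplit cur.reverse ('\n' :: rest) = cur :: rsplit [] rest := by
        simp [rsplit]
      rw [hr, withNL_cons _ _ (rsplit_ne_nil _ _)]
      simpa using ih (res ++ [String.ofList (cur ++ ['\n'])]) []
    · rw [if_neg hc]
      simp only [rsplit, if_neg hc]
      have hrev : (c :: cur.reverse) = (cur ++ [c]).reverse := by simp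
      rw [hrev]
      exact ih res (cur ++ [c])

-- ===== VERDICT (by name: the statement is the Claim_ definition above) =====
theorem split_source_py_spec : Claim_equal_split_source_py := by
  intro content _
  unfold Spec_split_source_py split_source_py split_source_py_alt
  simp only []
  rw [show "\n".toList = ['\n'] from rfl, splitOn_eq_rsplit]
  rw [foldA_eq_withNL (rsplit [] content.toList) 0 ((rsplit [] content.toList).length : Int) []
    (by simp)]
  rw [foldB_eq_withNL content.toList [] []]
  simp
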